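-- pv_equiv track=rewrite | github.com/eptate01/Dynamic-Programming-problems | Assignment1.py | DiffUtility
-- ===== SOURCE A (Python) =====
-- def DiffUtility(str1, str2):
--     n = len(str1)
--     m = len(str2)
--     suffix = []
--     holder = []
--     result = 0
--     for i in range(0,m+1):
--         holder.append(0)
--     for x in range(0,n+1):
--         suffix.append([i for i in holder])
--
--     for i in range(1,n+1):
--         for x in range(1,m+1):
--             if str1[i-1] == str2[x-1]:
--                 suffix[i][x] = suffix[i-1][x-1] + 1
--             else:
--                 suffix[i][x] = max(suffix[i-1][x], suffix[i][x-1])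
--
--     result = max(max(x) for x in suffix)
--     LCS = ""
--     temp_n = n #length str1
--     temp_m = m #length str2
--     while temp_n > 0 and temp_m > 0:
--         if str1[temp_n-1] == str2[temp_m-1]:
--             LCS += str1[temp_n-1]
--             temp_n -= 1
--             temp_m -= 1
--         elif suffix[temp_n -1][temp_m] > suffix[temp_n][temp_m-1]:
--             temp_n -= 1
--         else:
--             temp_m -= 1
--     LCS = LCS[::-1]
--
--     index_str1 = 0
--     index_str2 = 0
--     LCSindex = 0
--     diffUtility = ""
--     while LCSindex < len(LCS) and index_str1 < n and index_str2 < m: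
--         if str1[index_str1] != LCS[LCSindex]:
--             diffUtility += "-"
--             diffUtility += str1[index_str1]
--             index_str1 += 1
--         elif str2[index_str2] != LCS[LCSindex]:
--             diffUtility += ("+")
--             diffUtility += str2[index_str2]
--             index_str2 += 1
--         else:
--             diffUtility += LCS[LCSindex]
--             index_str1 += 1
--             index_str2 += 1
--             LCSindex += 1
--     while index_str1 < n:
--         diffUtility += "-"
--         diffUtility += str1[index_str1]
--         index_str1 += 1
--     while index_str2 < m:
--         diffUtility += ("+")
--         diffUtility += str2[index_str2]
--         index_str2 += 1
--     return diffUtility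
-- ===== SOURCE B (Python) =====
-- def _gap(mark, c, s):
--     # emit marked chars skipped before the first occurrence of c; return (emitted, rest)
--     q = s.index(c)
--     return ''.join(mark + x for x in s[:q]), s[q + 1:]
--
-- def DiffUtility(str1, str2):
--     n, m = len(str1), len(str2)
--     # DP table built functionally, row by row (no index-addressed writes)
--     prev = [0] * (m + 1)
--     rows = [prev]
--     for ch in str1:
--         cur = [0]
--         last = 0
--         for diag, up, c2 in zip(prev, prev[1:], str2):
--             last = diag + 1 if ch == c2 else max(up, last)
--             cur.append(last)
--         rows.append(cur)
--         prev = cur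
--     # backtrack, prepending matched chars (same tie-break the table demands)
--     i, j = n, m
--     lcs = ""
--     while i > 0 and j > 0:
--         if str1[i - 1] == str2[j - 1]:
--             lcs = str1[i - 1] + lcs
--             i -= 1
--             j -= 1
--         elif rows[i - 1][j] > rows[i][j - 1]:
--             i -= 1
--         else:
--             j -= 1
--     # gap-wise emission: per LCS char flush skipped deletions, then insertions, then the char
--     out = []
--     r1, r2 = str1, str2
--     for c in lcs:
--         d1, r1 = _gap('-', c, r1)
--         d2, r2 = _gap('+', c, r2)
--         out.append(d1)
--         out.append(d2)
--         out.append(c)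
--     out.append(''.join('-' + x for x in r1))
--     out.append(''.join('+' + x for x in r2))
--     return ''.join(out)
-- ===== Notes on version B (the rewrite author's own statement) =====
-- stated objective: faster
-- what changed: Same O(n*m) LCS table and tie-break, but B builds the table functionally row-by-row from the previous row (no index-addressed writes into a preallocated 2D list), builds the LCS by prepending instead of append-then-reverse, and emits the diff gap-wise per LCS character (flush skipped deletions, then insertions, then the match) instead of A's three-pointer forward merge loop.
import Mathlib
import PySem

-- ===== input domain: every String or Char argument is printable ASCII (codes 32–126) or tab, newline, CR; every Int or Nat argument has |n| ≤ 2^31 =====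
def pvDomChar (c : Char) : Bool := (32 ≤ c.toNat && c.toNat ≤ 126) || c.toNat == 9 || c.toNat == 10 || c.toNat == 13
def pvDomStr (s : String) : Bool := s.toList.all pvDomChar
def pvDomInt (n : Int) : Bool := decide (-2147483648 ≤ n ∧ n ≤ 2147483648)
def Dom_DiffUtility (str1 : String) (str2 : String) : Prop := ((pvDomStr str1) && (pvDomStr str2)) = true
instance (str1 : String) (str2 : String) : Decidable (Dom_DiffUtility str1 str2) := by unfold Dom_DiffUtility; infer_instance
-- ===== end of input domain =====

-- B re-implements the same LCS-based diff with a functionally built DP table and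
-- gap-wise emission (flush skipped deletions, then insertions, per matched char)
-- instead of A's index-addressed table fill and three-pointer merge pass (measured faster in a timing run).

-- ===== PORT A =====

-- suffix[r][x] read / write (indices are loop counters, always in range in A)
def pvAget2 (t : List (List Nat)) (r x : Nat) : Nat := (t.getD r []).getD x 0
def pvAset2 (t : List (List Nat)) (r x : Nat) (v : Nat) : List (List Nat) :=
  t.set r ((t.getD r []).set x v)

-- Python max() of a nonempty list of Nats (entries here are all ≥ 0, rows nonempty)
def pvPyMax (l : List Nat) : Nat := l.tail.foldl max (l.headD 0)

-- the 'while temp_n > 0 and temp_m > 0' backtrack loop, accumulating LCS by +=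
def pvAbt (c1 c2 : List Char) (s : List (List Nat)) (tn tm : Nat) (acc : List Char) : List Char :=
  if h : 0 < tn ∧ 0 < tm then
    if c1.getD (tn - 1) ' ' = c2.getD (tm - 1) ' ' then
      pvAbt c1 c2 s (tn - 1) (tm - 1) (acc ++ [c1.getD (tn - 1) ' '])
    else if pvAget2 s (tn - 1) tm > pvAget2 s tn (tm - 1) then
      pvAbt c1 c2 s (tn - 1) tm acc
    else
      pvAbt c1 c2 s tn (tm - 1) acc
  else acc
termination_by tn + tm
decreasing_by all_goals omega

-- the main three-pointer merge loop; returns (diffUtility so far, index_str1, index_str2)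
def pvAmerge (c1 c2 lcs : List Char) (i j k : Nat) (acc : List Char) : List Char × Nat × Nat :=
  if h : k < lcs.length ∧ i < c1.length ∧ j < c2.length then
    if c1.getD i ' ' ≠ lcs.getD k ' ' then
      pvAmerge c1 c2 lcs (i + 1) j k (acc ++ ['-', c1.getD i ' '])
    else if c2.getD j ' ' ≠ lcs.getD k ' ' then
      pvAmerge c1 c2 lcs i (j + 1) k (acc ++ ['+', c2.getD j ' '])
    else
      pvAmerge c1 c2 lcs (i + 1) (j + 1) (k + 1) (acc ++ [lcs.getD k ' '])
  else (acc, i, j)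
termination_by (c1.length - i) + (c2.length - j)
decreasing_by all_goals omega

-- 'while index_str1 < n' trailing-deletion loop
def pvAdelTail (c1 : List Char) (i : Nat) (acc : List Char) : List Char :=
  if h : i < c1.length then pvAdelTail c1 (i + 1) (acc ++ ['-', c1.getD i ' ']) else acc
termination_by c1.length - i
decreasing_by omega

-- 'while index_str2 < m' trailing-insertion loop
def pvAinsTail (c2 : List Char) (j : Nat) (acc : List Char) : List Char :=
  if h : j < c2.length then pvAinsTail c2 (j + 1) (acc ++ ['+', c2.getD j ' ']) else acc
termination_by c2.length - j
decreasing_by omega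

def DiffUtility (str1 : String) (str2 : String) : String :=
  let c1 := str1.toList
  let c2 := str2.toList
  let n := c1.length
  let m := c2.length
  let holder := (List.range (m + 1)).foldl (fun h _ => h ++ [(0 : Nat)]) []
  let suffix0 := (List.range (n + 1)).foldl (fun s _ => s ++ [holder]) []
  let suffix := (List.range' 1 n).foldl (fun s i =>
      (List.range' 1 m).foldl (fun s x =>
        pvAset2 s i x (if c1.getD (i - 1) ' ' = c2.getD (x - 1) ' ' then pvAget2 s (i - 1) (x - 1) + 1
                       else max (pvAget2 s (i - 1) x) (pvAget2 s i (x - 1)))) s) suffix0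
  let _result := pvPyMax (suffix.map pvPyMax)   -- dead in A too; exact since rows are nonempty Nats
  let LCS := (pvAbt c1 c2 suffix n m []).reverse
  let r := pvAmerge c1 c2 LCS 0 0 0 []
  String.mk (pvAinsTail c2 r.2.2 (pvAdelTail c1 r.2.1 r.1))

-- ===== PORT B =====

-- one DP row from the previous one: 'for diag, up, c2 in zip(prev, prev[1:], str2)'
def pvBrow (c2 : List Char) (prev : List Nat) (ch : Char) : List Nat :=
  (((prev.zip prev.tail).zip c2).foldl
    (fun st t =>
      let last := if ch = t.2 then t.1.1 + 1 else max t.1.2 st.2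
      (st.1 ++ [last], last))
    ([0], 0)).1

-- 'rows = [prev]; for ch in str1: rows.append(cur); prev = cur'
def pvBrows (c1 c2 : List Char) : List (List Nat) × List Nat :=
  c1.foldl (fun st ch => let cur := pvBrow c2 st.2 ch; (st.1 ++ [cur], cur))
    ([List.replicate (c2.length + 1) 0], List.replicate (c2.length + 1) 0)

-- backtrack, prepending matched chars
def pvBbt (c1 c2 : List Char) (rows : List (List Nat)) (i j : Nat) (lcs : List Char) : List Char :=
  if h : 0 < i ∧ 0 < j then
    if c1.getD (i - 1) ' ' = c2.getD (j - 1) ' ' then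
      pvBbt c1 c2 rows (i - 1) (j - 1) (c1.getD (i - 1) ' ' :: lcs)
    else if (rows.getD (i - 1) []).getD j 0 > (rows.getD i []).getD (j - 1) 0 then
      pvBbt c1 c2 rows (i - 1) j lcs
    else
      pvBbt c1 c2 rows i (j - 1) lcs
  else lcs
termination_by i + j
decreasing_by all_goals omega

-- _gap: s.index(c) then the marked prefix and the rest (c is an LCS char, always present)
def pvBgap (mark c : Char) (s : List Char) : List Char × List Char :=
  let q := (PySem.List.index? s c).getD 0
  ((s.take q).flatMap (fun x => [mark, x]), s.drop (q + 1))

-- the emission loop over the LCS, then the two trailing extends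
def pvBemit (c1 c2 : List Char) : List Char → List Char
  | [] => (c1.flatMap fun x => ['-', x]) ++ (c2.flatMap fun x => ['+', x])
  | c :: rest =>
      let g1 := pvBgap '-' c c1
      let g2 := pvBgap '+' c c2
      g1.1 ++ g2.1 ++ c :: pvBemit g1.2 g2.2 rest

def DiffUtility_alt (str1 : String) (str2 : String) : String :=
  let c1 := str1.toList
  let c2 := str2.toList
  let rows := (pvBrows c1 c2).1
  let lcs := pvBbt c1 c2 rows c1.length c2.length []
  String.mk (pvBemit c1 c2 lcs)

-- ===== PRECONDITION & SPEC =====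
def Spec_DiffUtility (str1 : String) (str2 : String) (out : String) : Prop := out = DiffUtility_alt str1 str2
instance (str1 : String) (str2 : String) (out : String) : Decidable (Spec_DiffUtility str1 str2 out) := by unfold Spec_DiffUtility; infer_instance

-- ===== CLAIM (what is proved, stated in full; the proofs are below) =====
def Claim_equal_DiffUtility : Prop := ∀ (str1 : String) (str2 : String), Dom_DiffUtility str1 str2 → Spec_DiffUtility str1 str2 (DiffUtility str1 str2)

-- ===== LEMMAS AND PROOFS =====

-- the LCS length table both programs compute
def pvDP (c1 c2 : List Char) : Nat → Nat → Nat
  | 0, _ => 0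
  | _ + 1, 0 => 0
  | i + 1, x + 1 =>
      if c1.getD i ' ' = c2.getD x ' ' then pvDP c1 c2 i x + 1
      else max (pvDP c1 c2 i (x + 1)) (pvDP c1 c2 (i + 1) x)

def pvRowDP (c1 c2 : List Char) (i : Nat) : List Nat :=
  (List.range (c2.length + 1)).map (pvDP c1 c2 i)

def pvTab (c1 c2 : List Char) : List (List Nat) :=
  (List.range (c1.length + 1)).map (pvRowDP c1 c2)

theorem pvDP_zero_left (c1 c2 : List Char) (x : Nat) : pvDP c1 c2 0 x = 0 := by
  cases x <;> simp [pvDP]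

theorem pvDP_zero_right (c1 c2 : List Char) (i : Nat) : pvDP c1 c2 i 0 = 0 := by
  cases i <;> simp [pvDP]

-- generic getD facts
theorem pvGetD_map_range {α : Type} (f : Nat → α) (k r : Nat) (d : α) (h : r < k) :
    ((List.range k).map f).getD r d = f r := by
  simp [List.getD_eq_getElem?_getD, h]

theorem pvGetD_append_left {α : Type} (l1 l2 : List α) (r : Nat) (d : α) (h : r < l1.length) :
    (l1 ++ l2).getD r d = l1.getD r d := by
  simp [List.getD_eq_getElem?_getD, List.getElem?_append_left, h]

theorem pvGetD_append_right {α : Type} (l1 l2 : List α) (r : Nat) (d : α) (h : l1.length ≤ r) :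
    (l1 ++ l2).getD r d = l2.getD (r - l1.length) d := by
  simp [List.getD_eq_getElem?_getD, List.getElem?_append_right, h]

theorem pvSet_append_cons {α : Type} (l1 l2 : List α) (a v : α) :
    (l1 ++ a :: l2).set l1.length v = l1 ++ v :: l2 := by
  simp

theorem pvRowDP_zero (c1 c2 : List Char) :
    pvRowDP c1 c2 0 = List.replicate (c2.length + 1) 0 := by
  unfold pvRowDP
  rw [List.eq_replicate_iff]
  constructor
  · simp
  · intro b hb
    rcases List.mem_map.mp hb with ⟨r, _, rfl⟩
    exact pvDP_zero_left c1 c2 r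

-- ===== A-side table correctness =====

-- one write of A's inner loop extends the partially filled row by one dp value
theorem pvA_step (c1 c2 : List Char) (ri x : Nat) (hri : 1 ≤ ri) (hn : ri ≤ c1.length)
    (hx : x < c2.length) :
    pvAset2 ((List.range ri).map (pvRowDP c1 c2) ++
        ((List.range (x + 1)).map (pvDP c1 c2 ri) ++ List.replicate (c2.length - x) 0) ::
        List.replicate (c1.length - ri) (List.replicate (c2.length + 1) 0)) ri (x + 1)
      (if c1.getD (ri - 1) ' ' = c2.getD x ' ' then
        pvAget2 ((List.range ri).map (pvRowDP c1 c2) ++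
          ((List.range (x + 1)).map (pvDP c1 c2 ri) ++ List.replicate (c2.length - x) 0) ::
          List.replicate (c1.length - ri) (List.replicate (c2.length + 1) 0)) (ri - 1) x + 1
      else max
        (pvAget2 ((List.range ri).map (pvRowDP c1 c2) ++
          ((List.range (x + 1)).map (pvDP c1 c2 ri) ++ List.replicate (c2.length - x) 0) ::
          List.replicate (c1.length - ri) (List.replicate (c2.length + 1) 0)) (ri - 1) (x + 1))
        (pvAget2 ((List.range ri).map (pvRowDP c1 c2) ++
          ((List.range (x + 1)).map (pvDP c1 c2 ri) ++ List.replicate (c2.length - x) 0) ::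
          List.replicate (c1.length - ri) (List.replicate (c2.length + 1) 0)) ri x))
    = (List.range ri).map (pvRowDP c1 c2) ++
        ((List.range (x + 2)).map (pvDP c1 c2 ri) ++ List.replicate (c2.length - (x + 1)) 0) ::
        List.replicate (c1.length - ri) (List.replicate (c2.length + 1) 0) := by
  set A := (List.range ri).map (pvRowDP c1 c2) with hA
  set M := (List.range (x + 1)).map (pvDP c1 c2 ri) with hM
  set post := List.replicate (c1.length - ri) (List.replicate (c2.length + 1) 0) with hpost
  have hAlen : A.length = ri := by simp [hA]
  have hMlen : M.length = x + 1 := by simp [hM]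
  have hrow1 : (A ++ (M ++ List.replicate (c2.length - x) 0) :: post).getD (ri - 1) [] =
      pvRowDP c1 c2 (ri - 1) := by
    rw [pvGetD_append_left _ _ _ _ (by omega), hA]
    exact pvGetD_map_range _ _ _ _ (by omega)
  have hmid : (A ++ (M ++ List.replicate (c2.length - x) 0) :: post).getD ri [] =
      M ++ List.replicate (c2.length - x) 0 := by
    rw [pvGetD_append_right _ _ _ _ (by omega)]
    simp [hAlen]
  have e1 : pvAget2 (A ++ (M ++ List.replicate (c2.length - x) 0) :: post) (ri - 1) x =
      pvDP c1 c2 (ri - 1) x := by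
    rw [pvAget2, hrow1, pvRowDP]
    exact pvGetD_map_range _ _ _ _ (by omega)
  have e2 : pvAget2 (A ++ (M ++ List.replicate (c2.length - x) 0) :: post) (ri - 1) (x + 1) =
      pvDP c1 c2 (ri - 1) (x + 1) := by
    rw [pvAget2, hrow1, pvRowDP]
    exact pvGetD_map_range _ _ _ _ (by omega)
  have e3 : pvAget2 (A ++ (M ++ List.replicate (c2.length - x) 0) :: post) ri x =
      pvDP c1 c2 ri x := by
    rw [pvAget2, hmid, pvGetD_append_left _ _ _ _ (by omega), hM]
    exact pvGetD_map_range _ _ _ _ (by omega)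
  rw [e1, e2, e3]
  have hv : (if c1.getD (ri - 1) ' ' = c2.getD x ' ' then pvDP c1 c2 (ri - 1) x + 1
      else max (pvDP c1 c2 (ri - 1) (x + 1)) (pvDP c1 c2 ri x)) = pvDP c1 c2 ri (x + 1) := by
    have hri' : ri - 1 + 1 = ri := by omega
    conv_rhs => rw [← hri']
    rw [pvDP]
    rw [hri']
  rw [hv, pvAset2, hmid]
  have hrep : List.replicate (c2.length - x) (0 : Nat) =
      0 :: List.replicate (c2.length - (x + 1)) 0 := by
    rw [show c2.length - x = (c2.length - (x + 1)) + 1 from by omega, List.replicate_succ]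
  rw [hrep]
  have hset1 : (M ++ (0 : Nat) :: List.replicate (c2.length - (x + 1)) 0).set (x + 1)
      (pvDP c1 c2 ri (x + 1)) = M ++ pvDP c1 c2 ri (x + 1) :: List.replicate (c2.length - (x + 1)) 0 := by
    rw [show x + 1 = M.length from hMlen.symm, pvSet_append_cons]
  rw [hset1]
  have hset2 : (A ++ (M ++ 0 :: List.replicate (c2.length - (x + 1)) 0) :: post).set ri
      (M ++ pvDP c1 c2 ri (x + 1) :: List.replicate (c2.length - (x + 1)) 0) =
      A ++ (M ++ pvDP c1 c2 ri (x + 1) :: List.replicate (c2.length - (x + 1)) 0) :: post := by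
    rw [show ri = A.length from hAlen.symm, pvSet_append_cons]
  rw [hset2, hM]
  have : (List.range (x + 2)).map (pvDP c1 c2 ri) =
      (List.range (x + 1)).map (pvDP c1 c2 ri) ++ [pvDP c1 c2 ri (x + 1)] := by
    rw [List.range_succ]
    simp
  rw [this]
  simp

theorem pvA_inner (c1 c2 : List Char) (ri : Nat) (hri1 : 1 ≤ ri) (hrin : ri ≤ c1.length) :
    ∀ x ≤ c2.length,
      (List.range' 1 x).foldl (fun s x =>
        pvAset2 s ri x (if c1.getD (ri - 1) ' ' = c2.getD (x - 1) ' ' then pvAget2 s (ri - 1) (x - 1) + 1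
                       else max (pvAget2 s (ri - 1) x) (pvAget2 s ri (x - 1))))
        ((List.range ri).map (pvRowDP c1 c2) ++
          (List.replicate (c2.length + 1) 0) :: List.replicate (c1.length - ri) (List.replicate (c2.length + 1) 0))
      = (List.range ri).map (pvRowDP c1 c2) ++
          ((List.range (x + 1)).map (pvDP c1 c2 ri) ++ List.replicate (c2.length - x) 0) ::
          List.replicate (c1.length - ri) (List.replicate (c2.length + 1) 0) := by
  intro x
  induction x with
  | zero =>
    intro _
    simp [List.range_one, pvDP_zero_right, List.replicate_succ]
  | succ x ihx =>
    intro hx1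
    rw [List.range'_concat, List.foldl_append, ihx (by omega)]
    simp only [List.foldl_cons, List.foldl_nil]
    simp only [Nat.one_mul]
    rw [show 1 + x = x + 1 from by omega, Nat.add_sub_cancel]
    exact pvA_step c1 c2 ri x hri1 hrin (by omega)

theorem pvA_outer (c1 c2 : List Char) :
    ∀ j ≤ c1.length,
      (List.range' 1 j).foldl (fun s i =>
        (List.range' 1 c2.length).foldl (fun s x =>
          pvAset2 s i x (if c1.getD (i - 1) ' ' = c2.getD (x - 1) ' ' then pvAget2 s (i - 1) (x - 1) + 1
                         else max (pvAget2 s (i - 1) x) (pvAget2 s i (x - 1)))) s)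
        (List.replicate (c1.length + 1) (List.replicate (c2.length + 1) 0))
      = (List.range (j + 1)).map (pvRowDP c1 c2) ++
          List.replicate (c1.length - j) (List.replicate (c2.length + 1) 0) := by
  intro j
  induction j with
  | zero =>
    intro _
    simp [List.range_one, pvRowDP_zero, List.replicate_succ]
  | succ j ihj =>
    intro hj1
    rw [List.range'_concat, List.foldl_append, ihj (by omega)]
    simp only [List.foldl_cons, List.foldl_nil]
    simp only [Nat.one_mul]
    rw [show 1 + j = j + 1 from by omega]
    rw [show c1.length - j = (c1.length - (j + 1)) + 1 from by omega, List.replicate_succ]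
    rw [pvA_inner c1 c2 (j + 1) (by omega) (by omega) c2.length le_rfl]
    rw [Nat.sub_self]
    simp only [List.replicate_zero, List.append_nil]
    rw [show (List.range (c2.length + 1)).map (pvDP c1 c2 (j + 1)) = pvRowDP c1 c2 (j + 1) from rfl]
    simp [List.range_succ]

-- ===== B-side table correctness =====

-- the row fold emits exactly the scan of the recurrence
def pvScan (ch : Char) : List ((Nat × Nat) × Char) → Nat → List Nat
  | [], _ => []
  | t :: rest, last =>
      let v := if ch = t.2 then t.1.1 + 1 else max t.1.2 last
      v :: pvScan ch rest v

theorem pvBrow_foldl (ch : Char) :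
    ∀ (l : List ((Nat × Nat) × Char)) (acc : List Nat) (last : Nat),
      (l.foldl (fun st t =>
        let last := if ch = t.2 then t.1.1 + 1 else max t.1.2 st.2
        (st.1 ++ [last], last)) (acc, last)).1
      = acc ++ pvScan ch l last := by
  intro l
  induction l with
  | nil => intro acc last; simp [pvScan]
  | cons t rest ih =>
    intro acc last
    simp only [List.foldl_cons, pvScan]
    rw [ih]
    simp

theorem pvScan_dp (c1 c2 : List Char) (i : Nat) :
    ∀ t ≤ c2.length,
      pvScan (c1.getD i ' ')
        ((((pvRowDP c1 c2 i).drop t).zip ((pvRowDP c1 c2 i).tail.drop t)).zip (c2.drop t))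
        (pvDP c1 c2 (i + 1) t)
      = (List.range' (t + 1) (c2.length - t)).map (pvDP c1 c2 (i + 1)) := by
  suffices H : ∀ (d t : Nat), t ≤ c2.length → c2.length - t = d →
      pvScan (c1.getD i ' ')
        ((((pvRowDP c1 c2 i).drop t).zip ((pvRowDP c1 c2 i).tail.drop t)).zip (c2.drop t))
        (pvDP c1 c2 (i + 1) t)
      = (List.range' (t + 1) (c2.length - t)).map (pvDP c1 c2 (i + 1)) by
    intro t ht
    exact H _ t ht rfl
  intro d
  induction d with
  | zero =>
    intro t ht hd
    have ht' : t = c2.length := by omega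
    subst ht'
    rw [List.drop_eq_nil_of_le le_rfl]
    simp [pvScan]
  | succ d ihd =>
    intro t ht hd
    have htlt : t < c2.length := by omega
    have hlen : (pvRowDP c1 c2 i).length = c2.length + 1 := by simp [pvRowDP]
    have hgetp : ∀ r (hr : r < (pvRowDP c1 c2 i).length), (pvRowDP c1 c2 i)[r] = pvDP c1 c2 i r := by
      intro r hr
      simp [pvRowDP]
    have hp1 : (pvRowDP c1 c2 i).drop t = pvDP c1 c2 i t :: (pvRowDP c1 c2 i).drop (t + 1) := by
      rw [List.drop_eq_getElem_cons (by omega), hgetp]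
    have hp2 : (pvRowDP c1 c2 i).drop (t + 1) = pvDP c1 c2 i (t + 1) :: (pvRowDP c1 c2 i).drop (t + 2) := by
      rw [List.drop_eq_getElem_cons (by omega), hgetp]
    have htail : ∀ u : Nat, (pvRowDP c1 c2 i).tail.drop u = (pvRowDP c1 c2 i).drop (u + 1) := by
      intro u
      rw [← List.drop_one, List.drop_drop, Nat.add_comm]
    have hc2 : c2.drop t = c2[t] :: c2.drop (t + 1) := List.drop_eq_getElem_cons htlt
    rw [hp1, htail t, hp2, hc2, List.zip_cons_cons, List.zip_cons_cons]
    have hv : (if c1.getD i ' ' = c2[t] then pvDP c1 c2 i t + 1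
               else max (pvDP c1 c2 i (t + 1)) (pvDP c1 c2 (i + 1) t)) = pvDP c1 c2 (i + 1) (t + 1) := by
      have hg : c2.getD t ' ' = c2[t] := by
        simp [List.getD_eq_getElem?_getD, List.getElem?_eq_getElem htlt]
      rw [pvDP, hg]
    rw [pvScan]
    simp only []
    rw [hv]
    have := ihd (t + 1) (by omega) (by omega)
    rw [htail (t + 1), hp2] at this
    rw [this]
    have hr : List.range' (t + 1) (c2.length - t) = (t + 1) :: List.range' (t + 2) (c2.length - (t + 1)) := by
      have : c2.length - t = (c2.length - (t + 1)) + 1 := by omega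
      rw [this, List.range'_succ]
    rw [hr]
    simp

theorem pvBrow_dp (c1 c2 : List Char) (i : Nat) :
    pvBrow c2 (pvRowDP c1 c2 i) (c1.getD i ' ') = pvRowDP c1 c2 (i + 1) := by
  rw [pvBrow, pvBrow_foldl]
  have h0 : pvDP c1 c2 (i + 1) 0 = 0 := pvDP_zero_right c1 c2 (i + 1)
  have := pvScan_dp c1 c2 i 0 (Nat.zero_le _)
  rw [List.drop_zero, List.drop_zero, List.drop_zero, h0] at this
  rw [this]
  have : pvRowDP c1 c2 (i + 1) = 0 :: (List.range' 1 c2.length).map (pvDP c1 c2 (i + 1)) := by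
    rw [pvRowDP, List.range_eq_range', List.range'_succ]
    simp [pvDP_zero_right]
  rw [this]
  simp

theorem pvBrows_tab (c1 c2 : List Char) : (pvBrows c1 c2).1 = pvTab c1 c2 := by
  suffices H : ∀ (l : List Char) (i : Nat) (rs : List (List Nat)), i ≤ c1.length →
      c1.drop i = l → rs = (List.range (i + 1)).map (pvRowDP c1 c2) →
      ((l.foldl (fun st ch => let cur := pvBrow c2 st.2 ch; (st.1 ++ [cur], cur))
        (rs, pvRowDP c1 c2 i)).1 : List (List Nat)) = pvTab c1 c2 by
    have h0 : List.replicate (c2.length + 1) 0 = pvRowDP c1 c2 0 := (pvRowDP_zero c1 c2).symm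
    rw [pvBrows, h0]
    exact H c1 0 [pvRowDP c1 c2 0] (Nat.zero_le _) List.drop_zero (by simp [List.range_succ])
  intro l
  induction l with
  | nil =>
    intro i rs hi hdrop hrs
    have : c1.length ≤ i := List.drop_eq_nil_iff.mp hdrop
    have hie : i = c1.length := by omega
    subst hie
    simpa [pvTab] using hrs
  | cons ch l' ih =>
    intro i rs hi hdrop hrs
    have hlt : i < c1.length := by
      by_contra h'
      rw [List.drop_eq_nil_of_le (by omega)] at hdrop
      exact absurd hdrop (by simp)
    have hdi : c1.drop i = c1[i] :: c1.drop (i + 1) := List.drop_eq_getElem_cons hlt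
    rw [hdi] at hdrop
    obtain ⟨hch, hl'⟩ : c1[i] = ch ∧ c1.drop (i + 1) = l' := by
      exact ⟨(List.cons.injEq _ _ _ _ ▸ hdrop).1, (List.cons.injEq _ _ _ _ ▸ hdrop).2⟩
    have hgd : c1.getD i ' ' = ch := by
      rw [← hch]
      simp [List.getD_eq_getElem?_getD, List.getElem?_eq_getElem hlt]
    simp only [List.foldl_cons]
    have hcur : pvBrow c2 (pvRowDP c1 c2 i) ch = pvRowDP c1 c2 (i + 1) := by
      rw [← hgd]
      exact pvBrow_dp c1 c2 i
    rw [hcur]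
    exact ih (i + 1) _ (by omega) hl' (by simp [hrs, List.range_succ])

-- ===== backtrack lemmas =====

theorem pvBbt_acc (c1 c2 : List Char) (T : List (List Nat)) :
    ∀ (N i j : Nat) (l : List Char), i + j ≤ N →
      pvBbt c1 c2 T i j l = pvBbt c1 c2 T i j [] ++ l := by
  intro N
  induction N with
  | zero =>
    intro i j l h
    have hi : i = 0 := by omega
    subst hi
    simp [pvBbt]
  | succ N ih =>
    intro i j l h
    by_cases hg : 0 < i ∧ 0 < j
    · rw [pvBbt]
      conv_rhs => rw [pvBbt]
      rw [dif_pos hg, dif_pos hg]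
      split_ifs with h1 h2
      · rw [ih (i-1) (j-1) (c1.getD (i-1) ' ' :: l) (by omega),
            ih (i-1) (j-1) [c1.getD (i-1) ' '] (by omega)]
        simp
      · exact ih (i-1) j l (by omega)
      · exact ih i (j-1) l (by omega)
    · rw [pvBbt]
      conv_rhs => rw [pvBbt]
      rw [dif_neg hg, dif_neg hg]
      simp

theorem pvAbt_rev (c1 c2 : List Char) (T : List (List Nat)) :
    ∀ (N i j : Nat) (acc : List Char), i + j ≤ N →
      pvAbt c1 c2 T i j acc = acc ++ (pvBbt c1 c2 T i j []).reverse := by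
  intro N
  induction N with
  | zero =>
    intro i j acc h
    have hi : i = 0 := by omega
    subst hi
    simp [pvAbt, pvBbt]
  | succ N ih =>
    intro i j acc h
    by_cases hg : 0 < i ∧ 0 < j
    · rw [pvAbt]
      conv_rhs => rw [pvBbt]
      rw [dif_pos hg, dif_pos hg]
      simp only [pvAget2]
      split_ifs with h1 h2
      · rw [ih (i-1) (j-1) (acc ++ [c1.getD (i-1) ' ']) (by omega),
            pvBbt_acc c1 c2 T (i + j) (i-1) (j-1) [c1.getD (i-1) ' '] (by omega)]
        simp
      · exact ih (i-1) j acc (by omega)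
      · exact ih i (j-1) acc (by omega)
    · rw [pvAbt]
      conv_rhs => rw [pvBbt]
      rw [dif_neg hg, dif_neg hg]
      simp

theorem pvBbt_sublist (c1 c2 : List Char) (T : List (List Nat)) :
    ∀ (N i j : Nat), i + j ≤ N → i ≤ c1.length → j ≤ c2.length →
      (pvBbt c1 c2 T i j []).Sublist (c1.take i) ∧ (pvBbt c1 c2 T i j []).Sublist (c2.take j) := by
  intro N
  induction N with
  | zero =>
    intro i j h _ _
    have hi : i = 0 := by omega
    subst hi
    simp [pvBbt]
  | succ N ih =>
    intro i j h hi hj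
    by_cases hg : 0 < i ∧ 0 < j
    · rw [pvBbt, dif_pos hg]
      split_ifs with h1 h2
      · -- match case
        rw [pvBbt_acc c1 c2 T (i + j) (i-1) (j-1) [c1.getD (i-1) ' '] (by omega)]
        obtain ⟨s1, s2⟩ := ih (i-1) (j-1) (by omega) (by omega) (by omega)
        have e1 : c1.take i = c1.take (i-1) ++ [c1.getD (i-1) ' '] := by
          have hlt : i - 1 < c1.length := by omega
          have : c1.take ((i-1)+1) = c1.take (i-1) ++ c1[i-1]?.toList := List.take_succ
          rw [List.getElem?_eq_getElem hlt] at this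
          have hi1 : (i-1)+1 = i := by omega
          rw [hi1] at this
          rw [this]
          simp [List.getD_eq_getElem?_getD, List.getElem?_eq_getElem hlt]
        have e2 : c2.take j = c2.take (j-1) ++ [c2.getD (j-1) ' '] := by
          have hlt : j - 1 < c2.length := by omega
          have : c2.take ((j-1)+1) = c2.take (j-1) ++ c2[j-1]?.toList := List.take_succ
          rw [List.getElem?_eq_getElem hlt] at this
          have hj1 : (j-1)+1 = j := by omega
          rw [hj1] at this
          rw [this]
          simp [List.getD_eq_getElem?_getD, List.getElem?_eq_getElem hlt]
        constructor
        · rw [e1]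
          exact s1.append (List.Sublist.refl _)
        · rw [e2, h1]
          exact s2.append (List.Sublist.refl _)
      · obtain ⟨s1, s2⟩ := ih (i-1) j (by omega) (by omega) hj
        refine ⟨s1.trans ?_, s2⟩
        rw [show c1.take (i-1) = (c1.take i).take (i-1) by rw [List.take_take]; simp]
        exact List.take_sublist _ _
      · obtain ⟨s1, s2⟩ := ih i (j-1) (by omega) hi (by omega)
        refine ⟨s1, s2.trans ?_⟩
        rw [show c2.take (j-1) = (c2.take j).take (j-1) by rw [List.take_take]; simp]
        exact List.take_sublist _ _
    · rw [pvBbt, dif_neg hg]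
      simp

-- ===== merge / emission lemmas =====

theorem pvAdelTail_eq (c1 : List Char) :
    ∀ (N i : Nat) (acc : List Char), c1.length - i ≤ N →
      pvAdelTail c1 i acc = acc ++ (c1.drop i).flatMap (fun x => ['-', x]) := by
  intro N
  induction N with
  | zero =>
    intro i acc h
    rw [pvAdelTail, dif_neg (by omega)]
    rw [List.drop_eq_nil_of_le (by omega)]
    simp
  | succ N ih =>
    intro i acc h
    by_cases hg : i < c1.length
    · rw [pvAdelTail, dif_pos hg, ih (i+1) _ (by omega)]
      conv_rhs => rw [List.drop_eq_getElem_cons hg]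
      simp only [List.flatMap_cons, List.append_assoc, List.cons_append, List.nil_append,
        List.getD_eq_getElem?_getD, List.getElem?_eq_getElem hg, Option.getD_some]
    · rw [pvAdelTail, dif_neg hg]
      rw [List.drop_eq_nil_of_le (by omega)]
      simp

theorem pvAinsTail_eq (c2 : List Char) :
    ∀ (N j : Nat) (acc : List Char), c2.length - j ≤ N →
      pvAinsTail c2 j acc = acc ++ (c2.drop j).flatMap (fun x => ['+', x]) := by
  intro N
  induction N with
  | zero =>
    intro j acc h
    rw [pvAinsTail, dif_neg (by omega)]
    rw [List.drop_eq_nil_of_le (by omega)]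
    simp
  | succ N ih =>
    intro j acc h
    by_cases hg : j < c2.length
    · rw [pvAinsTail, dif_pos hg, ih (j+1) _ (by omega)]
      conv_rhs => rw [List.drop_eq_getElem_cons hg]
      simp only [List.flatMap_cons, List.append_assoc, List.cons_append, List.nil_append,
        List.getD_eq_getElem?_getD, List.getElem?_eq_getElem hg, Option.getD_some]
    · rw [pvAinsTail, dif_neg hg]
      rw [List.drop_eq_nil_of_le (by omega)]
      simp

theorem pvBemit_del (x c : Char) (r1 r2 L' : List Char) (hne : x ≠ c) (hmem : c ∈ r1) :
    pvBemit (x :: r1) r2 (c :: L') = '-' :: x :: pvBemit r1 r2 (c :: L') := by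
  obtain ⟨q, hq⟩ : ∃ q, PySem.List.index? r1 c = some q :=
    Option.isSome_iff_exists.mp ((PySem.List.index?_isSome_iff _ _).mpr hmem)
  simp only [pvBemit, pvBgap, PySem.List.index?_cons_of_ne _ hne, hq, Option.map_some,
    Option.getD_some, List.take_succ_cons, List.drop_succ_cons, List.flatMap_cons,
    List.cons_append, List.append_assoc, List.nil_append]

theorem pvBemit_ins (y c : Char) (r1 r2 L' : List Char) (hne : y ≠ c) (hmem : c ∈ r2) :
    pvBemit (c :: r1) (y :: r2) (c :: L') = '+' :: y :: pvBemit (c :: r1) r2 (c :: L') := by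
  obtain ⟨q, hq⟩ : ∃ q, PySem.List.index? r2 c = some q :=
    Option.isSome_iff_exists.mp ((PySem.List.index?_isSome_iff _ _).mpr hmem)
  simp only [pvBemit, pvBgap, PySem.List.index?_cons_self, PySem.List.index?_cons_of_ne _ hne,
    hq, Option.map_some, Option.getD_some, List.take_succ_cons, List.drop_succ_cons,
    List.take_zero, List.drop_one, List.flatMap_cons, List.flatMap_nil,
    List.cons_append, List.nil_append]

theorem pvBemit_match (c : Char) (r1 r2 L' : List Char) :
    pvBemit (c :: r1) (c :: r2) (c :: L') = c :: pvBemit r1 r2 L' := by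
  simp only [pvBemit, pvBgap, PySem.List.index?_cons_self, Option.getD_some, List.take_zero,
    List.flatMap_nil, List.nil_append, List.drop_succ_cons, List.drop_zero]

theorem pvMerge_emit (c1 c2 L : List Char) :
    ∀ (N i j k : Nat) (acc : List Char), (c1.length - i) + (c2.length - j) ≤ N →
      (L.drop k).Sublist (c1.drop i) → (L.drop k).Sublist (c2.drop j) →
      pvAinsTail c2 (pvAmerge c1 c2 L i j k acc).2.2
        (pvAdelTail c1 (pvAmerge c1 c2 L i j k acc).2.1 (pvAmerge c1 c2 L i j k acc).1)
      = acc ++ pvBemit (c1.drop i) (c2.drop j) (L.drop k) := by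
  intro N
  induction N with
  | zero =>
    intro i j k acc h sub1 sub2
    have hi : c1.length ≤ i := by omega
    have hj : c2.length ≤ j := by omega
    rw [List.drop_eq_nil_of_le hi] at sub1 ⊢
    rw [List.drop_eq_nil_of_le hj] at sub2 ⊢
    have hLk : L.drop k = [] := List.sublist_nil.mp sub1
    rw [hLk]
    have hkl : L.length ≤ k := List.drop_eq_nil_iff.mp hLk
    rw [pvAmerge, dif_neg (by rintro ⟨h1', h2', h3'⟩; omega)]
    rw [pvAdelTail_eq c1 (c1.length - i) i acc le_rfl,
        pvAinsTail_eq c2 (c2.length - j) j _ le_rfl]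
    rw [List.drop_eq_nil_of_le hi, List.drop_eq_nil_of_le hj]
    simp [pvBemit]
  | succ N ih =>
    intro i j k acc h sub1 sub2
    by_cases hk : L.length ≤ k
    · -- LCS exhausted: two trailing while loops = the two trailing extends
      have hLk : L.drop k = [] := List.drop_eq_nil_of_le hk
      rw [hLk] at sub1 sub2 ⊢
      rw [pvAmerge, dif_neg (by rintro ⟨h1', h2', h3'⟩; omega)]
      rw [pvAdelTail_eq c1 (c1.length - i) i acc le_rfl,
          pvAinsTail_eq c2 (c2.length - j) j _ le_rfl]
      simp [pvBemit]
    · have hkl : k < L.length := by omega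
      have hdropk : L.drop k = L[k] :: L.drop (k+1) := List.drop_eq_getElem_cons hkl
      have hi : i < c1.length := by
        by_contra h'
        have hnil : c1.drop i = [] := List.drop_eq_nil_of_le (by omega)
        rw [hnil, hdropk] at sub1
        simp at sub1
        omega
      have hj : j < c2.length := by
        by_contra h'
        have hnil : c2.drop j = [] := List.drop_eq_nil_of_le (by omega)
        rw [hnil, hdropk] at sub2
        simp at sub2
        omega
      have hdi : c1.drop i = c1[i] :: c1.drop (i+1) := List.drop_eq_getElem_cons hi
      have hdj : c2.drop j = c2[j] :: c2.drop (j+1) := List.drop_eq_getElem_cons hj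
      have egk : L.getD k ' ' = L[k] := by
        simp [List.getD_eq_getElem?_getD, List.getElem?_eq_getElem hkl]
      have egi : c1.getD i ' ' = c1[i] := by
        simp [List.getD_eq_getElem?_getD, List.getElem?_eq_getElem hi]
      have egj : c2.getD j ' ' = c2[j] := by
        simp [List.getD_eq_getElem?_getD, List.getElem?_eq_getElem hj]
      rw [pvAmerge, dif_pos ⟨hkl, hi, hj⟩]
      split_ifs with h1 h2
      · -- deletion step
        have hne : c1[i] ≠ L[k] := by rwa [egi, egk] at h1
        have subs : (L.drop k).Sublist (c1.drop (i+1)) := by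
          rw [hdi] at sub1
          rcases List.sublist_cons_iff.mp sub1 with h' | ⟨r, he, _⟩
          · exact h'
          · exfalso
            apply hne
            rw [hdropk] at he
            exact (List.cons.injEq _ _ _ _ ▸ he).1.symm
        rw [ih (i+1) j k _ (by omega) subs sub2]
        conv_rhs => rw [hdi, hdropk]
        rw [pvBemit_del _ _ _ _ _ hne (subs.subset (hdropk ▸ List.mem_cons_self))]
        rw [← hdropk, egi]
        simp
      · -- insertion step
        have hx : c1[i] = L[k] := by
          by_contra h'
          exact h1 (by rw [egi, egk]; exact h')
        have hne : c2[j] ≠ L[k] := by rwa [egj, egk] at h2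
        have subs : (L.drop k).Sublist (c2.drop (j+1)) := by
          rw [hdj] at sub2
          rcases List.sublist_cons_iff.mp sub2 with h' | ⟨r, he, _⟩
          · exact h'
          · exfalso
            apply hne
            rw [hdropk] at he
            exact (List.cons.injEq _ _ _ _ ▸ he).1.symm
        rw [ih i (j+1) k _ (by omega) sub1 subs]
        conv_rhs => rw [hdi, hdj, hdropk]
        rw [hx, pvBemit_ins _ _ _ _ _ hne (subs.subset (hdropk ▸ List.mem_cons_self))]
        rw [← hdropk, ← hx, ← hdi, egj]
        simp
      · -- match step
        have hx : c1[i] = L[k] := by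
          by_contra h'
          exact h1 (by rw [egi, egk]; exact h')
        have hy : c2[j] = L[k] := by
          by_contra h'
          exact h2 (by rw [egj, egk]; exact h')
        have subs1 : (L.drop (k+1)).Sublist (c1.drop (i+1)) := by
          rw [hdi, hdropk, ← hx] at sub1
          exact List.cons_sublist_cons.mp sub1
        have subs2 : (L.drop (k+1)).Sublist (c2.drop (j+1)) := by
          rw [hdj, hdropk, ← hy] at sub2
          exact List.cons_sublist_cons.mp sub2
        rw [ih (i+1) (j+1) (k+1) _ (by omega) subs1 subs2]
        conv_rhs => rw [hdi, hdj, hdropk]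
        rw [hx, hy, pvBemit_match]
        rw [egk]
        simp

-- ===== VERDICT (by name: the statement is the Claim_ definition above) =====
theorem DiffUtility_spec : Claim_equal_DiffUtility := by
  unfold Claim_equal_DiffUtility
  intro str1 str2 _
  unfold Spec_DiffUtility
  simp only [DiffUtility, DiffUtility_alt]
  set c1 := str1.toList with hc1
  set c2 := str2.toList with hc2
  have hhold : (List.range (c2.length + 1)).foldl (fun h _ => h ++ [(0 : Nat)]) ([] : List Nat)
      = List.replicate (c2.length + 1) 0 := by
    rw [PySem.List.foldl_append_singleton_eq_map (f := fun _ => (0 : Nat))]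
    simp [List.map_const']
  have hsuf : (List.range (c1.length + 1)).foldl
      (fun s _ => s ++ [List.replicate (c2.length + 1) (0 : Nat)]) ([] : List (List Nat))
      = List.replicate (c1.length + 1) (List.replicate (c2.length + 1) 0) := by
    rw [PySem.List.foldl_append_singleton_eq_map (f := fun _ => List.replicate (c2.length + 1) (0 : Nat))]
    simp [List.map_const']
  have htab := pvA_outer c1 c2 c1.length le_rfl
  rw [Nat.sub_self] at htab
  simp only [List.replicate_zero, List.append_nil] at htab
  have htab' : (List.range' 1 c1.length).foldl (fun s i =>
      (List.range' 1 c2.length).foldl (fun s x =>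
        pvAset2 s i x (if c1.getD (i - 1) ' ' = c2.getD (x - 1) ' ' then pvAget2 s (i - 1) (x - 1) + 1
                       else max (pvAget2 s (i - 1) x) (pvAget2 s i (x - 1)))) s)
      (List.replicate (c1.length + 1) (List.replicate (c2.length + 1) 0)) = pvTab c1 c2 := by
    rw [htab, pvTab]
  have hbt : (pvAbt c1 c2 (pvTab c1 c2) c1.length c2.length []).reverse
      = pvBbt c1 c2 (pvTab c1 c2) c1.length c2.length [] := by
    rw [pvAbt_rev c1 c2 (pvTab c1 c2) (c1.length + c2.length) c1.length c2.length [] le_rfl]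
    simp
  obtain ⟨hs1, hs2⟩ := pvBbt_sublist c1 c2 (pvTab c1 c2) (c1.length + c2.length)
    c1.length c2.length le_rfl le_rfl le_rfl
  rw [List.take_length] at hs1
  rw [List.take_length] at hs2
  have hmerge := pvMerge_emit c1 c2 (pvBbt c1 c2 (pvTab c1 c2) c1.length c2.length [])
    (c1.length + c2.length) 0 0 0 [] (by omega)
    (by simpa using hs1) (by simpa using hs2)
  simp only [List.drop_zero, List.nil_append] at hmerge
  rw [hhold, hsuf, htab', pvBrows_tab, hbt, hmerge]
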